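-- pv_equiv track=rewrite | github.com/rachellea/sarle-labeler | term_search.py | aggregate_dicts
-- ===== SOURCE A (Python) =====
-- def aggregate_dicts(dicts):
--     super_dict = {}
--     keylens = 0
--     for d in dicts:
--         keylens+=len(list(d.keys()))
--         for k, v in d.items():
--             super_dict[k] = v
--     assert len(list(super_dict.keys())) == keylens
--     return super_dict
-- ===== SOURCE B (Python) =====
-- def aggregate_dicts(dicts):
--     if not dicts:
--         return {}
--     if len(dicts) == 1:
--         return dict(dicts[0])
--     mid = len(dicts) // 2
--     left = aggregate_dicts(dicts[:mid])
--     right = aggregate_dicts(dicts[mid:])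
--     assert left.keys().isdisjoint(right.keys())
--     left.update(right)
--     return left
-- ===== Notes on version B (the rewrite author's own statement) =====
-- stated objective: alternative
-- what changed: Replaces the single nested insertion loop with a global key-count assert by a divide-and-conquer recursion: split the list in half, merge each half recursively, and combine the two halves with a set-disjointness assert before updating.
import Mathlib
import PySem

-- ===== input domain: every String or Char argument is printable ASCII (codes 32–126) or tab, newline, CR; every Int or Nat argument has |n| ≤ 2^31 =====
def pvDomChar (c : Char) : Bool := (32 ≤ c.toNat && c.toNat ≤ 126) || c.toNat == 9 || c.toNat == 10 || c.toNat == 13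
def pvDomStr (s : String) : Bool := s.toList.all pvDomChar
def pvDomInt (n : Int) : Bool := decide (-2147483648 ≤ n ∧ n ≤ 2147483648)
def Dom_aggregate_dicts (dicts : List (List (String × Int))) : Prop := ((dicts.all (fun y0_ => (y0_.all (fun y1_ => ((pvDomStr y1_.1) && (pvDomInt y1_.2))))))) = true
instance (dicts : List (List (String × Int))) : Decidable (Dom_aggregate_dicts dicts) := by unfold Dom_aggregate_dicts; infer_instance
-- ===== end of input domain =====

-- B replaces A's single nested insertion loop + global key-count assert by a divide-and-conquer
-- recursion (merge halves, assert key-disjointness at each combine); alternative decomposition, same result.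

-- ===== PORT A =====
-- nested loop: for d in dicts: keylens += len(d.keys()); for k, v in d.items(): super_dict[k] = v
-- (the trailing assert always passes on inputs admitted by Pre_ below, so the port returns super_dict.items)
def aggregate_dicts (dicts : List (List (String × Int))) : List (String × Int) :=
  (dicts.foldl
    (fun (st : PySem.Dict String Int × Int) dl =>
      let d := PySem.Dict.ofList dl
      (d.items.foldl (fun sd kv => sd.insert kv.1 kv.2) st.1,
       st.2 + ((d.keys.length : Int))))
    (PySem.Dict.empty, 0)).1.items

-- ===== PORT B =====
-- divide and conquer: empty → {}, singleton → dict(d); else split at mid = len//2,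
-- merge each half recursively, then left.update(right)
-- (B's disjointness assert passes on inputs admitted by Pre_ below)
-- mid is len(dicts)//2: Nat division is exact here since a list length is nonnegative.
-- The recursion is guarded by a fuel argument (called with fuel = len(dicts), which always suffices:
-- both recursive calls are on strictly shorter lists); the fuel-0 branch is unreachable.
def aggBF (fuel : Nat) (dicts : List (List (String × Int))) : PySem.Dict String Int :=
  match fuel, dicts with
  | _, [] => PySem.Dict.empty
  | _, [d] => PySem.Dict.ofList d
  | 0, _ => PySem.Dict.empty
  | f + 1, ds =>
    let mid := ds.length / 2
    let left := aggBF f (ds.take mid)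
    let right := aggBF f (ds.drop mid)
    right.items.foldl (fun a kv => a.insert kv.1 kv.2) left

def aggregate_dicts_alt (dicts : List (List (String × Int))) : List (String × Int) :=
  (aggBF dicts.length dicts).items

-- ===== PRECONDITION & SPEC =====
-- Pre_ excludes exactly the inputs on which Python A raises AssertionError: two different
-- input dicts sharing a key. (Both A and B raise there.)
def Pre_aggregate_dicts (dicts : List (List (String × Int))) : Prop :=
  List.Pairwise (fun d1 d2 => ∀ k ∈ d1.map Prod.fst, k ∉ d2.map Prod.fst) dicts
instance (dicts : List (List (String × Int))) : Decidable (Pre_aggregate_dicts dicts) := by unfold Pre_aggregate_dicts; infer_instance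
def pvWitness_aggregate_dicts : (List (List (String × Int))) := [[("a", 1)], [("b", 2), ("c", 3)]]

def Spec_aggregate_dicts (dicts : List (List (String × Int))) (out : List (String × Int)) : Prop := out = aggregate_dicts_alt dicts
instance (dicts : List (List (String × Int))) (out : List (String × Int)) : Decidable (Spec_aggregate_dicts dicts out) := by unfold Spec_aggregate_dicts; infer_instance

-- ===== CLAIM (what is proved, stated in full; the proofs are below) =====
def Claim_equal_aggregate_dicts : Prop := ∀ (dicts : List (List (String × Int))), Dom_aggregate_dicts dicts → Pre_aggregate_dicts dicts → Spec_aggregate_dicts dicts (aggregate_dicts dicts)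

-- ===== LEMMAS AND PROOFS =====

-- the normal form both ports are proved equal to: the concatenation of the deduped item lists
def chunks (dicts : List (List (String × Int))) : List (List (String × Int)) :=
  dicts.map (fun dl => (PySem.Dict.ofList dl).items)

-- A's fold with the (dict, keylens) pair projects to the plain nested insertion fold.
lemma aggA_fst (dicts : List (List (String × Int))) :
    ∀ (sd : PySem.Dict String Int) (n : Int),
      (dicts.foldl
        (fun (st : PySem.Dict String Int × Int) dl =>
          let d := PySem.Dict.ofList dl
          (d.items.foldl (fun sd kv => sd.insert kv.1 kv.2) st.1,
           st.2 + ((d.keys.length : Int))))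
        (sd, n)).1
      = dicts.foldl (fun sd dl => (PySem.Dict.ofList dl).items.foldl (fun sd kv => sd.insert kv.1 kv.2) sd) sd := by
  induction dicts with
  | nil => intro sd n; rfl
  | cons hd tl ih => intro sd n; simpa using ih _ _

-- the nested insertion fold equals one insertion fold over the flattened item chunks
lemma fold_flatMap (dicts : List (List (String × Int))) :
    ∀ (sd : PySem.Dict String Int),
      dicts.foldl (fun sd dl => (PySem.Dict.ofList dl).items.foldl (fun sd kv => sd.insert kv.1 kv.2) sd) sd
      = (dicts.flatMap (fun dl => (PySem.Dict.ofList dl).items)).foldl (fun sd kv => sd.insert kv.1 kv.2) sd := by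
  induction dicts with
  | nil => intro sd; rfl
  | cons hd tl ih => intro sd; simp [List.foldl_append, ih]

-- every key of the deduped items of dl is a key of dl
lemma keys_chunk_sub (dl : List (String × Int)) (k : String)
    (h : k ∈ ((PySem.Dict.ofList dl).items.map Prod.fst)) : k ∈ dl.map Prod.fst := by
  have h2 : (PySem.Dict.ofList dl).keys
      = PySem.Set.update (PySem.Dict.empty : PySem.Dict String Int).keys (dl.map Prod.fst) :=
    PySem.Dict.keys_foldl_insert_key dl Prod.fst (fun _ x => x.2) PySem.Dict.empty
  have h3 : k ∈ (PySem.Dict.ofList dl).keys := by simpa [PySem.Dict.keys] using h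
  rw [h2, PySem.Dict.keys_empty] at h3
  rcases (PySem.Set.mem_update _ _ _).mp h3 with h4 | h4
  · cases h4
  · exact h4

lemma nodup_chunk (dl : List (String × Int)) : ((PySem.Dict.ofList dl).items.map Prod.fst).Nodup := by
  simpa [PySem.Dict.keys] using PySem.Dict.nodup_keys_ofList (ps := dl)

lemma mem_flatten_chunks {k : String} {dicts : List (List (String × Int))}
    (h : k ∈ ((chunks dicts).flatten.map Prod.fst)) : ∃ dl ∈ dicts, k ∈ dl.map Prod.fst := by
  rcases List.mem_map.mp h with ⟨p, hp, rfl⟩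
  rcases List.mem_flatten.mp hp with ⟨c, hc, hpc⟩
  rcases List.mem_map.mp hc with ⟨dl, hdl, rfl⟩
  exact ⟨dl, hdl, keys_chunk_sub dl p.1 (List.mem_map.mpr ⟨p, hpc, rfl⟩)⟩

lemma nodup_flatten_chunks (dicts : List (List (String × Int)))
    (h : Pre_aggregate_dicts dicts) : ((chunks dicts).flatten.map Prod.fst).Nodup := by
  induction dicts with
  | nil => simp [chunks]
  | cons hd tl ih =>
    rcases List.pairwise_cons.mp h with ⟨hhd, htl⟩
    simp only [chunks, List.map_cons, List.flatten_cons, List.map_append]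
    refine List.Nodup.append (nodup_chunk hd) (by simpa [chunks] using ih htl) ?_
    intro k hk1 hk2
    have hk1' : k ∈ hd.map Prod.fst := keys_chunk_sub hd k hk1
    rcases mem_flatten_chunks (by simpa [chunks] using hk2) with ⟨dl, hdl, hkdl⟩
    exact hhd dl hdl k hk1' hkdl

-- a fold inserting fresh, distinct keys appends its items (restated in the ports' syntax)
lemma fold_fresh (L : PySem.Dict String Int) (l : List (String × Int))
    (hdisj : ∀ a ∈ l, L.contains a.1 = false) (hnd : (l.map Prod.fst).Nodup) :
    (l.foldl (fun a kv => a.insert kv.1 kv.2) L).items = L.items ++ l := by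
  simpa using PySem.Dict.items_foldl_insert_fresh (l := l) (k := Prod.fst) (v := Prod.snd)
    (d := L) hdisj hnd

lemma A_items (dicts : List (List (String × Int))) (h : Pre_aggregate_dicts dicts) :
    aggregate_dicts dicts = (chunks dicts).flatten := by
  unfold aggregate_dicts
  rw [aggA_fst, fold_flatMap]
  have hflat : dicts.flatMap (fun dl => (PySem.Dict.ofList dl).items) = (chunks dicts).flatten := by
    simp [chunks, List.flatMap_def]
  rw [hflat, fold_fresh _ _ (fun a _ => by simp [pysem]) (nodup_flatten_chunks dicts h)]
  rfl

lemma aggBF_succ (f : Nat) (d1 d2 : List (String × Int)) (t : List (List (String × Int))) :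
    aggBF (f + 1) (d1 :: d2 :: t)
      = (aggBF f ((d1 :: d2 :: t).drop ((d1 :: d2 :: t).length / 2))).items.foldl
          (fun a kv => a.insert kv.1 kv.2)
          (aggBF f ((d1 :: d2 :: t).take ((d1 :: d2 :: t).length / 2))) := rfl

lemma B_items_aux : ∀ (n : Nat) (dicts : List (List (String × Int))), dicts.length ≤ n →
    Pre_aggregate_dicts dicts → (aggBF n dicts).items = (chunks dicts).flatten := by
  intro n
  induction n with
  | zero =>
    intro dicts hlen _
    have : dicts = [] := List.eq_nil_of_length_eq_zero (Nat.le_zero.mp hlen)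
    subst this; rfl
  | succ n ih =>
    intro dicts hlen hp
    rcases dicts with _ | ⟨d1, _ | ⟨d2, t⟩⟩
    · rfl
    · simp [aggBF, chunks]
    · rw [aggBF_succ]
      have hlen2 : (d1 :: d2 :: t).length = t.length + 2 := by simp
      have hpre_t : Pre_aggregate_dicts ((d1 :: d2 :: t).take ((d1 :: d2 :: t).length / 2)) :=
        hp.sublist (List.take_sublist _ _)
      have hpre_d : Pre_aggregate_dicts ((d1 :: d2 :: t).drop ((d1 :: d2 :: t).length / 2)) :=
        hp.sublist (List.drop_sublist _ _)
      have hL := ih ((d1 :: d2 :: t).take ((d1 :: d2 :: t).length / 2))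
        (by simp only [List.length_take, hlen2]; simp only [hlen2] at hlen; omega) hpre_t
      have hR := ih ((d1 :: d2 :: t).drop ((d1 :: d2 :: t).length / 2))
        (by simp only [List.length_drop, hlen2]; simp only [hlen2] at hlen; omega) hpre_d
      have hsplit := (List.pairwise_append.mp
        (show Pre_aggregate_dicts ((d1 :: d2 :: t).take ((d1 :: d2 :: t).length / 2)
            ++ (d1 :: d2 :: t).drop ((d1 :: d2 :: t).length / 2)) by
          rw [List.take_append_drop]; exact hp)).2.2
      have hdisj : ∀ a ∈ (aggBF n ((d1 :: d2 :: t).drop ((d1 :: d2 :: t).length / 2))).items,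
          (aggBF n ((d1 :: d2 :: t).take ((d1 :: d2 :: t).length / 2))).contains a.1 = false := by
        intro a ha
        have haR : a.1 ∈ (chunks ((d1 :: d2 :: t).drop ((d1 :: d2 :: t).length / 2))).flatten.map Prod.fst := by
          rw [hR] at ha
          exact List.mem_map.mpr ⟨a, ha, rfl⟩
        rcases mem_flatten_chunks haR with ⟨dl, hdl, hkdl⟩
        rw [Bool.eq_false_iff]
        intro hc
        have hmem := (PySem.Dict.contains_iff_mem_keys _ _).mp hc
        have haL : a.1 ∈ (chunks ((d1 :: d2 :: t).take ((d1 :: d2 :: t).length / 2))).flatten.map Prod.fst := by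
          rw [← hL]; exact hmem
        rcases mem_flatten_chunks haL with ⟨dl', hdl', hkdl'⟩
        exact hsplit dl' hdl' dl hdl a.1 hkdl' hkdl
      have hnd : ((aggBF n ((d1 :: d2 :: t).drop ((d1 :: d2 :: t).length / 2))).items.map Prod.fst).Nodup := by
        rw [hR]; exact nodup_flatten_chunks _ hpre_d
      rw [fold_fresh _ _ hdisj hnd, hL, hR, ← List.flatten_append]
      unfold chunks
      rw [← List.map_append, List.take_append_drop]

lemma B_items (dicts : List (List (String × Int))) (h : Pre_aggregate_dicts dicts) :
    (aggBF dicts.length dicts).items = (chunks dicts).flatten :=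
  B_items_aux dicts.length dicts le_rfl h

-- ===== VERDICT (by name: the statement is the Claim_ definition above) =====
theorem aggregate_dicts_spec : Claim_equal_aggregate_dicts := by
  intro dicts _ hp
  show aggregate_dicts dicts = aggregate_dicts_alt dicts
  rw [A_items dicts hp]
  unfold aggregate_dicts_alt
  rw [B_items dicts hp]
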